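-- pv_equiv track=rewrite | github.com/adzam5/alfy-projects | Intro2CSPython/week3/image_editor/image_editor.py | divide_channels
-- ===== SOURCE A (Python) =====
-- def divide_channels(image):
--     chan = len(image[0][0])
--     lst = []
--     for i in range(chan):
--         ch = []
--         for row in image:
--             r = []
--             for px in row:
--                 r.append(px[i])
--             ch.append(r)
--         lst.append(ch)
--     return lst
-- ===== SOURCE B (Python) =====
-- def divide_channels(image):
--     chan = len(image[0][0])
--     planes = [[] for _ in range(chan)]
--     for row in image:
--         rows = [[] for _ in range(chan)]
--         for px in row:
--             for i in range(chan):
--                 rows[i].append(px[i])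
--         for i in range(chan):
--             planes[i].append(rows[i])
--     return planes
-- ===== Notes on version B (the rewrite author's own statement) =====
-- stated objective: alternative
-- what changed: One single pass over the pixels distributing each component into all channel planes at once, instead of A's chan separate full scans of the whole image (channel-outer loop removed).
import Mathlib
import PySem

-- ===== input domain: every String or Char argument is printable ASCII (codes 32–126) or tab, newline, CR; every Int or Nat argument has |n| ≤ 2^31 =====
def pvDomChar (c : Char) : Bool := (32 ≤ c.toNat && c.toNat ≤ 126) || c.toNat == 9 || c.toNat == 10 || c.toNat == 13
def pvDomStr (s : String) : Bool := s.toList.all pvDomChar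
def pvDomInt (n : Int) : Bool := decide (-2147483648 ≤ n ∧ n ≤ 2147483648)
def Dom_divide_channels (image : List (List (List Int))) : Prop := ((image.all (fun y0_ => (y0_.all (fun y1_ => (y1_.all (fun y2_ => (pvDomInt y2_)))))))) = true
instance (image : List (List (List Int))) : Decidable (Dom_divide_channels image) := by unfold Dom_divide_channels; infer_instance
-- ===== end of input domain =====

-- B makes one single pass over the pixels, distributing each component into all channel
-- planes at once, instead of A's chan separate full scans of the image (alternative decomposition).

-- ===== PORT A =====
-- chan = len(image[0][0]); for i in range(chan): for row in image: for px in row: r.append(px[i])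
def divide_channels (image : List (List (List Int))) : List (List (List Int)) :=
  let chan : Nat := ((PySem.List.pyGet? ((PySem.List.pyGet? image 0).getD []) 0).getD []).length
  (PySem.List.pyRange 0 (chan : Int) 1).foldl (fun lst i =>
    lst ++ [image.foldl (fun ch row =>
      ch ++ [row.foldl (fun r px => r ++ [(PySem.List.pyGet? px i).getD 0]) []]) []]) []

-- ===== PORT B =====
-- single pass: per row build chan row-lists, each pixel feeds all of them; zip into the planes
def divide_channels_alt (image : List (List (List Int))) : List (List (List Int)) :=
  let chan : Nat := ((PySem.List.pyGet? ((PySem.List.pyGet? image 0).getD []) 0).getD []).length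
  image.foldl (fun planes row =>
    let rows := row.foldl (fun rs px =>
      rs.mapIdx (fun i r => r ++ [(PySem.List.pyGet? px (i : Int)).getD 0]))
      (List.replicate chan ([] : List Int))
    List.zipWith (fun p r => p ++ [r]) planes rows)
    (List.replicate chan ([] : List (List Int)))

-- ===== PRECONDITION & SPEC =====
-- Pre_ excludes exactly the inputs where Python A raises IndexError: empty image, empty
-- first row, or some pixel shorter than the first pixel (px[i] out of range).
def Pre_divide_channels (image : List (List (List Int))) : Prop :=
  image ≠ [] ∧ (image.headD []) ≠ [] ∧
  ∀ row ∈ image, ∀ px ∈ row, ((image.headD []).headD []).length ≤ px.length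
instance (image : List (List (List Int))) : Decidable (Pre_divide_channels image) := by
  unfold Pre_divide_channels; infer_instance
def pvWitness_divide_channels : List (List (List Int)) := [[[1, 2], [3, 4]], [[5, 6]]]

def Spec_divide_channels (image : List (List (List Int))) (out : List (List (List Int))) : Prop := out = divide_channels_alt image
instance (image : List (List (List Int))) (out : List (List (List Int))) : Decidable (Spec_divide_channels image out) := by unfold Spec_divide_channels; infer_instance

-- ===== CLAIM (what is proved, stated in full; the proofs are below) =====
def Claim_equal_divide_channels : Prop := ∀ (image : List (List (List Int))), Dom_divide_channels image → Pre_divide_channels image → Spec_divide_channels image (divide_channels image)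

-- ===== LEMMAS AND PROOFS =====

-- appending singletons in a foldl is map
theorem pv_foldl_append_map {α β : Type} (f : α → β) (l : List α) (acc : List β) :
    l.foldl (fun a x => a ++ [f x]) acc = acc ++ l.map f := by
  induction l generalizing acc with
  | nil => simp
  | cons x xs ih => simp [ih]

theorem pv_mapIdx_mapIdx {α β γ : Type} (f : Nat → α → β) (g : Nat → β → γ) (l : List α) :
    (l.mapIdx f).mapIdx g = l.mapIdx (fun i x => g i (f i x)) := by
  apply List.ext_getElem <;> simp

theorem pv_mapIdx_replicate {α β : Type} (f : Nat → α → β) (n : Nat) (a : α) :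
    (List.replicate n a).mapIdx f = (List.range n).map (fun i => f i a) := by
  apply List.ext_getElem <;> simp

theorem pv_zipWith_map_same {α β γ δ : Type} (h : β → γ → δ) (f : α → β) (g : α → γ)
    (l : List α) : List.zipWith h (l.map f) (l.map g) = l.map (fun x => h (f x) (g x)) := by
  induction l with
  | nil => rfl
  | cons x xs ih => simp [ih]

-- B's inner per-row loop, generalized over the accumulator
theorem pv_rows_fold (g : Nat → List Int → Int) (row : List (List Int))
    (rs : List (List Int)) :
    row.foldl (fun rs px => rs.mapIdx (fun i r => r ++ [g i px])) rs
      = rs.mapIdx (fun i r => r ++ row.map (fun px => g i px)) := by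
  induction row generalizing rs with
  | nil =>
      simp only [List.foldl_nil]
      apply List.ext_getElem <;> simp
  | cons px rest ih =>
      simp only [List.foldl_cons, ih, pv_mapIdx_mapIdx]
      apply List.ext_getElem <;> simp

theorem pv_replicate_as_map {α : Type} (n : Nat) (a : α) :
    List.replicate n a = (List.range n).map (fun _ => a) := by
  apply List.ext_getElem <;> simp

-- B's outer loop, with the planes kept as a map over the channel indices
theorem pv_B_invariant (chan : Nat) (img : List (List (List Int)))
    (acc : Nat → List (List Int)) :
    img.foldl (fun planes row =>
        List.zipWith (fun p r => p ++ [r]) planes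
          (row.foldl (fun rs px =>
              rs.mapIdx (fun i r => r ++ [(PySem.List.pyGet? px (i : Int)).getD 0]))
            (List.replicate chan ([] : List Int))))
      ((List.range chan).map acc)
      = (List.range chan).map
          (fun i => acc i ++ img.map (fun row => row.map (fun px => px[i]?.getD 0))) := by
  induction img generalizing acc with
  | nil => simp
  | cons row rest ih =>
      rw [List.foldl_cons, pv_rows_fold, pv_mapIdx_replicate, pv_zipWith_map_same, ih]
      apply List.ext_getElem <;> simp

-- ===== VERDICT (by name: the statement is the Claim_ definition above) =====
theorem divide_channels_spec : Claim_equal_divide_channels := by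
  intro image _ _
  simp only [Spec_divide_channels, divide_channels, divide_channels_alt]
  rw [pv_replicate_as_map _ ([] : List (List Int)), pv_B_invariant, PySem.List.pyRange_zero_natCast]
  simp only [pv_foldl_append_map, List.map_map, List.nil_append]
  apply List.ext_getElem <;> simp
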